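-- pv_equiv track=rewrite | github.com/codificando12/python_programming_exercises_book | 18_buy_8_1_free.py | getCostOfCoffee
-- ===== SOURCE A (Python) =====
-- def getCostOfCoffee(numberOfCoffees, pricePerCoffee):
--     if numberOfCoffees == 0:
--         return 0
--
--     price = 0
--     coffees = 0
--     for i in  range(numberOfCoffees):
--         if coffees == 8 :
--             numberOfCoffees -= 1
--             coffees = 0
--         else:
--             price += pricePerCoffee
--             coffees += 1
--     return price
-- ===== SOURCE B (Python) =====
-- def getCostOfCoffee(numberOfCoffees, pricePerCoffee):
--     if numberOfCoffees <= 0: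
--         return 0
--     full, rem = divmod(numberOfCoffees, 9)
--     return (8 * full + rem) * pricePerCoffee
-- ===== Notes on version B (the rewrite author's own statement) =====
-- stated objective: faster
-- what changed: Replaced the per-coffee loop (pay 8, 9th free) by the closed form (8*(n//9) + n%9) * pricePerCoffee via divmod.
import Mathlib
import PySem

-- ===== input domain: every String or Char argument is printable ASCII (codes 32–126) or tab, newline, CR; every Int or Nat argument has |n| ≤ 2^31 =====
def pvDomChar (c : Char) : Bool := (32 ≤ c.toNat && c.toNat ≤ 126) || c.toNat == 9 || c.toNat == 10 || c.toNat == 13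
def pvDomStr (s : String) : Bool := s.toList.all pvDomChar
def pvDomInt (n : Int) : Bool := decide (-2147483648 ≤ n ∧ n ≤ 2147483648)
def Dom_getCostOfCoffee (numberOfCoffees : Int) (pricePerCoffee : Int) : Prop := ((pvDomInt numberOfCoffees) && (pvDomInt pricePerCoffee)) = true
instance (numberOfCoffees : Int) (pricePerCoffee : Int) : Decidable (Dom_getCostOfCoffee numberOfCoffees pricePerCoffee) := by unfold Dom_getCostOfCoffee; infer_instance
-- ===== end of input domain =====

-- B replaces A's per-coffee loop by the O(1) closed form (8*(n//9) + n%9) * price; equivalence is exact, no precondition.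

-- ===== PORT A =====
-- loop state: (price, coffees, numberOfCoffees); the loop body ignores the range element
def getCostOfCoffee (numberOfCoffees : Int) (pricePerCoffee : Int) : Int :=
  if numberOfCoffees = 0 then 0
  else
    ((PySem.List.pyRange 0 numberOfCoffees 1).foldl
      (fun (st : Int × Int × Int) _ =>
        if st.2.1 = 8 then (st.1, 0, st.2.2 - 1)
        else (st.1 + pricePerCoffee, st.2.1 + 1, st.2.2))
      (0, 0, numberOfCoffees)).1

-- ===== PORT B =====
def getCostOfCoffee_alt (numberOfCoffees : Int) (pricePerCoffee : Int) : Int :=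
  if numberOfCoffees ≤ 0 then 0
  else
    let full := PySem.Int.floordiv numberOfCoffees 9
    let rem := PySem.Int.mod numberOfCoffees 9
    (8 * full + rem) * pricePerCoffee

-- ===== PRECONDITION & SPEC =====
def Spec_getCostOfCoffee (numberOfCoffees : Int) (pricePerCoffee : Int) (out : Int) : Prop := out = getCostOfCoffee_alt numberOfCoffees pricePerCoffee
instance (numberOfCoffees : Int) (pricePerCoffee : Int) (out : Int) : Decidable (Spec_getCostOfCoffee numberOfCoffees pricePerCoffee out) := by unfold Spec_getCostOfCoffee; infer_instance

-- ===== CLAIM (what is proved, stated in full; the proofs are below) =====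
def Claim_equal_getCostOfCoffee : Prop := ∀ (numberOfCoffees : Int) (pricePerCoffee : Int), Dom_getCostOfCoffee numberOfCoffees pricePerCoffee → Spec_getCostOfCoffee numberOfCoffees pricePerCoffee (getCostOfCoffee numberOfCoffees pricePerCoffee)

-- ===== LEMMAS AND PROOFS =====

-- the loop's exact state after k iterations
theorem coffee_loop_invariant (p n0 : Int) (k : Nat) :
    (List.range k).foldl
      (fun (st : Int × Int × Int) (_ : Nat) =>
        if st.2.1 = 8 then (st.1, 0, st.2.2 - 1)
        else (st.1 + p, st.2.1 + 1, st.2.2))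
      (0, 0, n0)
    = (((k : Int) - (k / 9 : Nat)) * p, ((k % 9 : Nat) : Int), n0 - (k / 9 : Nat)) := by
  induction k with
  | zero => simp
  | succ k ih =>
    rw [List.range_succ, List.foldl_append, ih]
    simp only [List.foldl_cons, List.foldl_nil]
    by_cases h : (k % 9 : Nat) = 8
    · have h9 : (k + 1) / 9 = k / 9 + 1 := by omega
      have hm : (k + 1) % 9 = 0 := by omega
      simp only [h, h9, hm]
      push_cast
      norm_num [Prod.ext_iff]
      ring
    · have h9 : (k + 1) / 9 = k / 9 := by omega
      have hm : (k + 1) % 9 = k % 9 + 1 := by omega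
      have hne : ((k % 9 : Nat) : Int) ≠ 8 := by
        intro hc; exact h (by exact_mod_cast hc)
      simp only [h9, hm, if_neg hne]
      push_cast
      norm_num [Prod.ext_iff]
      ring

-- ===== VERDICT (by name: the statement is the Claim_ definition above) =====
theorem getCostOfCoffee_spec : Claim_equal_getCostOfCoffee := by
  intro n p _
  unfold Spec_getCostOfCoffee getCostOfCoffee getCostOfCoffee_alt
  by_cases hz : n = 0
  · simp [hz]
  · rw [if_neg hz]
    by_cases hneg : n ≤ 0
    · have : PySem.List.pyRange 0 n 1 = [] := by
        have : (n - 0).toNat = 0 := by omega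
        rw [PySem.List.pyRange_one, this]; rfl
      simp [this, hneg]
    · rw [if_neg hneg]
      push Not at hneg
      set k : Nat := n.toNat with hk
      have hn : n = (k : Int) := by omega
      have hfold : (PySem.List.pyRange 0 n 1).foldl
          (fun (st : Int × Int × Int) _ =>
            if st.2.1 = 8 then (st.1, 0, st.2.2 - 1)
            else (st.1 + p, st.2.1 + 1, st.2.2))
          (0, 0, n)
        = (((k : Int) - (k / 9 : Nat)) * p, ((k % 9 : Nat) : Int), n - (k / 9 : Nat)) := by
        rw [PySem.List.pyRange_one]
        have hb : (n - 0).toNat = k := by omega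
        rw [hb, List.foldl_map]
        exact coffee_loop_invariant p n k
      rw [hfold]
      have hdiv : PySem.Int.floordiv n 9 = ((k / 9 : Nat) : Int) := by
        rw [hn]; exact_mod_cast PySem.Int.floordiv_natCast k 9
      have hmod : PySem.Int.mod n 9 = ((k % 9 : Nat) : Int) := by
        rw [hn]; exact_mod_cast PySem.Int.mod_natCast k 9
      simp only [hdiv, hmod]
      have h9 : (k : Int) - ((k / 9 : Nat) : Int) = 8 * ((k / 9 : Nat) : Int) + ((k % 9 : Nat) : Int) := by
        push_cast; omega
      rw [h9]
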